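-- pv_equiv track=rewrite | github.com/AzzyOxx/pec-atividades | sem13-q4-arrays_vendas_dos_fabricantes_de_veiculos.py | maior_valor_coluna_matriz
-- ===== SOURCE A (Python) =====
-- def maior_valor_coluna_matriz(matriz):
--     soma_por_coluna = 0
--     maior = 0, 0
--     ano = matriz[0][0][1]
--     qntd_colunas = len(matriz[0])
--     for colunas in range(qntd_colunas):
--         for linha in matriz:
--             #ano = linha[1]
--             for elemento in linha:
--                 if elemento[1] == ano:
--                     soma_por_coluna += elemento[2]
--         if soma_por_coluna > maior[0]:
--             maior = soma_por_coluna, ano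
--         ano += 1
--         soma_por_coluna = 0
--     return maior
-- ===== SOURCE B (Python) =====
-- def maior_valor_coluna_matriz(matriz):
--     ano0 = matriz[0][0][1]
--     n = len(matriz[0])
--     totais = {}
--     for linha in matriz:
--         for elemento in linha:
--             totais[elemento[1]] = totais.get(elemento[1], 0) + elemento[2]
--     maior = 0, 0
--     for k in range(n):
--         soma = totais.get(ano0 + k, 0)
--         if soma > maior[0]:
--             maior = soma, ano0 + k
--     return maior
-- ===== Notes on version B (the rewrite author's own statement) =====
-- stated objective: faster
-- what changed: B builds a year->sum dictionary in one pass over the matrix and then scans the n candidate years with O(1) lookups, instead of A's re-scanning the whole matrix once per column.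
import Mathlib
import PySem

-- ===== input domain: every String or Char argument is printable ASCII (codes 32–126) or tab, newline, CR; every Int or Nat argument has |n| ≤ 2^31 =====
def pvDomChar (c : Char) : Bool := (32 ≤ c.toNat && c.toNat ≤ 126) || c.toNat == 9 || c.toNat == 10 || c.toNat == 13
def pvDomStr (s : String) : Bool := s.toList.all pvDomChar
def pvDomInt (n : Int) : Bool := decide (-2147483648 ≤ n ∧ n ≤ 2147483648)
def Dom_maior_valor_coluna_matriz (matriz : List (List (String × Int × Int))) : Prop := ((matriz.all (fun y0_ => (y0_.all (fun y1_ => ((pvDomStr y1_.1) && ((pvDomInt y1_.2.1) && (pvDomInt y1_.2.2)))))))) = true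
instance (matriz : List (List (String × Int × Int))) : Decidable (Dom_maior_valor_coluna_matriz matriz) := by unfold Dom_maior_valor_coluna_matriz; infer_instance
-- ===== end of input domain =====

-- B replaces A's per-column rescan of the whole matrix by one pass building a year→sum
-- dictionary followed by a scan of the candidate years (objective: faster).

-- ===== PORT A =====
def maior_valor_coluna_matriz (matriz : List (List (String × Int × Int))) : Int × Int :=
  match matriz with
  | [] => (0, 0)  -- matriz[0] raises IndexError; excluded by Pre_
  | row0 :: _ =>
    match row0 with
    | [] => (0, 0)  -- matriz[0][0] raises IndexError; excluded by Pre_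
    | e0 :: _ =>
      let qntd_colunas : Int := PySem.List.len row0
      ((PySem.List.pyRange 0 qntd_colunas 1).foldl
        (fun (st : (Int × Int) × Int) _ =>
          let soma_por_coluna := matriz.foldl (fun s linha =>
            linha.foldl (fun s elemento =>
              if elemento.2.1 == st.2 then s + elemento.2.2 else s) s) 0
          let maior := if soma_por_coluna > st.1.1 then (soma_por_coluna, st.2) else st.1
          (maior, st.2 + 1))
        ((0, 0), e0.2.1)).1

-- ===== PORT B =====
def maior_valor_coluna_matriz_alt (matriz : List (List (String × Int × Int))) : Int × Int :=
  match matriz with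
  | [] => (0, 0)  -- matriz[0] raises IndexError; excluded by Pre_
  | row0 :: _ =>
    match row0 with
    | [] => (0, 0)  -- matriz[0][0] raises IndexError; excluded by Pre_
    | e0 :: _ =>
      let ano0 : Int := e0.2.1
      let n : Int := PySem.List.len row0
      let totais : PySem.Dict Int Int := matriz.foldl (fun d linha =>
        linha.foldl (fun d e => d.insert e.2.1 (d.getD e.2.1 0 + e.2.2)) d)
        PySem.Dict.empty
      (PySem.List.pyRange 0 n 1).foldl
        (fun (maior : Int × Int) k =>
          let soma := totais.getD (ano0 + k) 0
          if soma > maior.1 then (soma, ano0 + k) else maior)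
        (0, 0)

-- ===== PRECONDITION & SPEC =====
-- Pre_ excludes exactly the inputs where the Python A raises IndexError at matriz[0][0]:
-- an empty matrix or an empty first row (B raises there too).
def Pre_maior_valor_coluna_matriz (matriz : List (List (String × Int × Int))) : Prop :=
  matriz ≠ [] ∧ matriz.headD [] ≠ []
instance (matriz : List (List (String × Int × Int))) : Decidable (Pre_maior_valor_coluna_matriz matriz) := by unfold Pre_maior_valor_coluna_matriz; infer_instance
def pvWitness_maior_valor_coluna_matriz : (List (List (String × Int × Int))) :=
  [[("a", 2000, 3), ("b", 2001, 5)], [("c", 2000, 4), ("d", 2001, 1)]]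
def Spec_maior_valor_coluna_matriz (matriz : List (List (String × Int × Int))) (out : Int × Int) : Prop := out = maior_valor_coluna_matriz_alt matriz
instance (matriz : List (List (String × Int × Int))) (out : Int × Int) : Decidable (Spec_maior_valor_coluna_matriz matriz out) := by unfold Spec_maior_valor_coluna_matriz; infer_instance

-- ===== CLAIM (what is proved, stated in full; the proofs are below) =====
def Claim_equal_maior_valor_coluna_matriz : Prop := ∀ (matriz : List (List (String × Int × Int))), Dom_maior_valor_coluna_matriz matriz → Pre_maior_valor_coluna_matriz matriz → Spec_maior_valor_coluna_matriz matriz (maior_valor_coluna_matriz matriz)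

-- ===== LEMMAS AND PROOFS =====

-- A's inner per-row sum, and B's per-row dict update
def pvRowSum (y : Int) (xs : List (String × Int × Int)) (s : Int) : Int :=
  xs.foldl (fun s e => if e.2.1 == y then s + e.2.2 else s) s
def pvRowDict (xs : List (String × Int × Int)) (d : PySem.Dict Int Int) : PySem.Dict Int Int :=
  xs.foldl (fun d e => d.insert e.2.1 (d.getD e.2.1 0 + e.2.2)) d

lemma pvRowSum_shift (y : Int) (xs : List (String × Int × Int)) (s : Int) :
    pvRowSum y xs s = s + pvRowSum y xs 0 := by
  induction xs generalizing s with
  | nil => simp [pvRowSum]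
  | cons e xs ih =>
    have h1 : pvRowSum y (e :: xs) s = pvRowSum y xs (if e.2.1 == y then s + e.2.2 else s) := rfl
    have h2 : pvRowSum y (e :: xs) 0 = pvRowSum y xs (if e.2.1 == y then 0 + e.2.2 else 0) := rfl
    rw [h1, h2]
    conv_lhs => rw [ih]
    conv_rhs => rw [ih]
    split_ifs <;> omega

lemma pvRowDict_getD (xs : List (String × Int × Int)) (d : PySem.Dict Int Int) (y : Int) :
    (pvRowDict xs d).getD y 0 = d.getD y 0 + pvRowSum y xs 0 := by
  induction xs generalizing d with
  | nil => simp [pvRowDict, pvRowSum]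
  | cons e xs ih =>
    have h1 : pvRowDict (e :: xs) d = pvRowDict xs (d.insert e.2.1 (d.getD e.2.1 0 + e.2.2)) := rfl
    have h2 : pvRowSum y (e :: xs) 0 = pvRowSum y xs (if e.2.1 == y then 0 + e.2.2 else 0) := rfl
    have hs := pvRowSum_shift y xs (if (e.2.1 == y) then (0:Int) + e.2.2 else 0)
    rw [h1, ih, h2, PySem.Dict.getD_insert]
    by_cases h : y = e.2.1
    · subst h
      simp only [BEq.rfl, if_true] at hs ⊢
      omega
    · have hb : (e.2.1 == y) = false := beq_eq_false_iff_ne.mpr (fun hh => h hh.symm)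
      simp only [hb, Bool.false_eq_true, if_false, if_neg h] at hs ⊢

lemma pvMatSum_shift (y : Int) (m : List (List (String × Int × Int))) (s : Int) :
    m.foldl (fun s linha => pvRowSum y linha s) s = s + m.foldl (fun s linha => pvRowSum y linha s) 0 := by
  induction m generalizing s with
  | nil => simp
  | cons r m ih =>
    simp only [List.foldl_cons]
    rw [ih (pvRowSum y r s), ih (pvRowSum y r 0), pvRowSum_shift]
    omega

lemma pvMatDict_getD (m : List (List (String × Int × Int))) (d : PySem.Dict Int Int) (y : Int) :
    (m.foldl (fun d linha => pvRowDict linha d) d).getD y 0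
      = d.getD y 0 + m.foldl (fun s linha => pvRowSum y linha s) 0 := by
  induction m generalizing d with
  | nil => simp
  | cons r m ih =>
    simp only [List.foldl_cons]
    rw [ih, pvRowDict_getD, pvMatSum_shift y m (pvRowSum y r 0)]
    omega

-- A's column loop with per-year sum g equals B's candidate-year scan
lemma pvLoop_eq (g : Int → Int) (ano0 : Int) (n : Nat) :
    ∀ (j : Int) (m : Int × Int),
    ((PySem.List.pyRange j (j + n) 1).foldl
      (fun (st : (Int × Int) × Int) _ =>
        ((if g st.2 > st.1.1 then (g st.2, st.2) else st.1), st.2 + 1))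
      (m, ano0 + j)).1
    = (PySem.List.pyRange j (j + n) 1).foldl
        (fun (maior : Int × Int) k => if g (ano0 + k) > maior.1 then (g (ano0 + k), ano0 + k) else maior) m := by
  induction n with
  | zero => intro j m; rw [PySem.List.pyRange_one_eq_nil (by omega)]; rfl
  | succ n ih =>
    intro j m
    rw [PySem.List.pyRange_one_cons (by push_cast; omega)]
    simp only [List.foldl_cons]
    have h : j + ((n : Int) + 1) = (j + 1) + (n : Int) := by omega
    have h2 : ano0 + j + 1 = ano0 + (j + 1) := by omega
    have := ih (j + 1) (if g (ano0 + j) > m.1 then (g (ano0 + j), ano0 + j) else m)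
    push_cast
    rw [h, h2]
    simpa using this

-- ===== VERDICT (by name: the statement is the Claim_ definition above) =====
theorem maior_valor_coluna_matriz_spec : Claim_equal_maior_valor_coluna_matriz := by
  intro matriz _ hpre
  obtain ⟨h1, h2⟩ := hpre
  obtain ⟨r, rest, rfl⟩ : ∃ r rest, matriz = r :: rest := by
    cases matriz with
    | nil => exact absurd rfl h1
    | cons r rest => exact ⟨r, rest, rfl⟩
  obtain ⟨e, es, rfl⟩ : ∃ e es, r = e :: es := by
    cases r with
    | nil => simp at h2
    | cons e es => exact ⟨e, es, rfl⟩
  unfold Spec_maior_valor_coluna_matriz maior_valor_coluna_matriz maior_valor_coluna_matriz_alt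
  show ((PySem.List.pyRange 0 (PySem.List.len (e :: es)) 1).foldl
      (fun (st : (Int × Int) × Int) _ =>
        let soma_por_coluna := ((e :: es) :: rest).foldl (fun s linha =>
          linha.foldl (fun s elemento =>
            if elemento.2.1 == st.2 then s + elemento.2.2 else s) s) 0
        let maior := if soma_por_coluna > st.1.1 then (soma_por_coluna, st.2) else st.1
        (maior, st.2 + 1))
      ((0, 0), e.2.1)).1
    = (PySem.List.pyRange 0 (PySem.List.len (e :: es)) 1).foldl
        (fun (maior : Int × Int) k =>
          let soma := (((e :: es) :: rest).foldl (fun d linha =>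
            linha.foldl (fun d e => d.insert e.2.1 (d.getD e.2.1 0 + e.2.2)) d)
            PySem.Dict.empty).getD (e.2.1 + k) 0
          if soma > maior.1 then (soma, e.2.1 + k) else maior)
        (0, 0)
  have hsum : ∀ y : Int,
      (((e :: es) :: rest).foldl (fun s linha =>
        linha.foldl (fun s elemento =>
          if elemento.2.1 == y then s + elemento.2.2 else s) s) 0)
      = (((e :: es) :: rest).foldl (fun d linha =>
          linha.foldl (fun d e => d.insert e.2.1 (d.getD e.2.1 0 + e.2.2)) d)
          PySem.Dict.empty).getD y 0 := by
    intro y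
    have hA : ((e :: es) :: rest).foldl (fun s linha =>
        linha.foldl (fun s elemento =>
          if elemento.2.1 == y then s + elemento.2.2 else s) s) 0
      = ((e :: es) :: rest).foldl (fun s linha => pvRowSum y linha s) 0 := rfl
    have hB : ((e :: es) :: rest).foldl (fun d linha =>
        linha.foldl (fun d e => d.insert e.2.1 (d.getD e.2.1 0 + e.2.2)) d)
        PySem.Dict.empty
      = ((e :: es) :: rest).foldl (fun d linha => pvRowDict linha d) PySem.Dict.empty := rfl
    rw [hA, hB, pvMatDict_getD]
    simp
  have hfun :
      (fun (st : (Int × Int) × Int) (_ : Int) =>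
        let soma_por_coluna := ((e :: es) :: rest).foldl (fun s linha =>
          linha.foldl (fun s elemento =>
            if elemento.2.1 == st.2 then s + elemento.2.2 else s) s) 0
        let maior := if soma_por_coluna > st.1.1 then (soma_por_coluna, st.2) else st.1
        (maior, st.2 + 1))
      = (fun (st : (Int × Int) × Int) (_ : Int) =>
        ((if (((e :: es) :: rest).foldl (fun d linha =>
              linha.foldl (fun d e => d.insert e.2.1 (d.getD e.2.1 0 + e.2.2)) d)
              PySem.Dict.empty).getD st.2 0 > st.1.1
          then ((((e :: es) :: rest).foldl (fun d linha =>
              linha.foldl (fun d e => d.insert e.2.1 (d.getD e.2.1 0 + e.2.2)) d)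
              PySem.Dict.empty).getD st.2 0, st.2)
          else st.1), st.2 + 1)) := by
    funext st k
    simp only [hsum st.2]
  rw [hfun]
  have hloop := pvLoop_eq
    (fun y => (((e :: es) :: rest).foldl (fun d linha =>
      linha.foldl (fun d e => d.insert e.2.1 (d.getD e.2.1 0 + e.2.2)) d)
      PySem.Dict.empty).getD y 0)
    e.2.1 (e :: es).length 0 (0, 0)
  simp only [add_zero, zero_add] at hloop
  simp only [PySem.List.len_eq]
  exact hloop
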